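-- pv_equiv track=rewrite | github.com/atniclimate/TCR-policy-scanner | scripts/build_tribal_aliases.py | _all_tokens_are_states
-- ===== SOURCE A (Python) =====
-- _US_STATES = {
--     "alabama", "alaska", "arizona", "arkansas", "california", "colorado",
--     "connecticut", "delaware", "florida", "georgia", "hawaii", "idaho",
--     "illinois", "indiana", "iowa", "kansas", "kentucky", "louisiana",
--     "maine", "maryland", "massachusetts", "michigan", "minnesota",
--     "mississippi", "missouri", "montana", "nebraska", "nevada",
--     "new hampshire", "new jersey", "new mexico", "new york",
--     "north carolina", "north dakota", "ohio", "oklahoma", "oregon",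
--     "pennsylvania", "rhode island", "south carolina", "south dakota",
--     "tennessee", "texas", "utah", "vermont", "virginia", "washington",
--     "west virginia", "wisconsin", "wyoming",
-- }
--
-- def _all_tokens_are_states(tokens: list[str]) -> bool:
--     """Check if a list of tokens represents state names.
--
--     Handles multi-word state names like 'new mexico' by consuming
--     tokens greedily.
--     """
--     i = 0
--     found_any = False
--     while i < len(tokens):
--         # Try two-word state first
--         if i + 1 < len(tokens):
--             two_word = f"{tokens[i]} {tokens[i+1]}"
--             if two_word.lower() in _US_STATES:
--                 found_any = True
--                 i += 2
--                 continue
--         # Try single-word state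
--         if tokens[i].lower() in _US_STATES:
--             found_any = True
--             i += 1
--             continue
--         # Not a state -- fail
--         return False
--     return found_any
-- ===== SOURCE B (Python) =====
-- _US_STATES = {
--     "alabama", "alaska", "arizona", "arkansas", "california", "colorado",
--     "connecticut", "delaware", "florida", "georgia", "hawaii", "idaho",
--     "illinois", "indiana", "iowa", "kansas", "kentucky", "louisiana",
--     "maine", "maryland", "massachusetts", "michigan", "minnesota",
--     "mississippi", "missouri", "montana", "nebraska", "nevada",
--     "new hampshire", "new jersey", "new mexico", "new york",
--     "north carolina", "north dakota", "ohio", "oklahoma", "oregon",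
--     "pennsylvania", "rhode island", "south carolina", "south dakota",
--     "tennessee", "texas", "utah", "vermont", "virginia", "washington",
--     "west virginia", "wisconsin", "wyoming",
-- }
--
-- def _all_tokens_are_states(tokens: list[str]) -> bool:
--     """Word-break DP: reachable[i] = tokens[:i] segments into state names.
--
--     Kept with O(1) state: r1 = reachable[i-1], r2 = reachable[i-2].
--     """
--     r2 = False
--     r1 = True  # reachable[0]
--     prev = None
--     for tok in tokens:
--         cur = (r1 and tok.lower() in _US_STATES) or (
--             prev is not None and r2 and f"{prev} {tok}".lower() in _US_STATES
--         )
--         r2, r1, prev = r1, cur, tok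
--     return bool(tokens) and r1
-- ===== Notes on version B (the rewrite author's own statement) =====
-- stated objective: alternative
-- what changed: Replaces A's greedy two-word-first token consumer (index jumps of 1 or 2 with a found_any flag) with a word-break reachability DP done in one fold carrying O(1) state (reachable[i-1], reachable[i-2], previous token); equivalence rests on the fact that no one-word state begins a two-word state.
import Mathlib
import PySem

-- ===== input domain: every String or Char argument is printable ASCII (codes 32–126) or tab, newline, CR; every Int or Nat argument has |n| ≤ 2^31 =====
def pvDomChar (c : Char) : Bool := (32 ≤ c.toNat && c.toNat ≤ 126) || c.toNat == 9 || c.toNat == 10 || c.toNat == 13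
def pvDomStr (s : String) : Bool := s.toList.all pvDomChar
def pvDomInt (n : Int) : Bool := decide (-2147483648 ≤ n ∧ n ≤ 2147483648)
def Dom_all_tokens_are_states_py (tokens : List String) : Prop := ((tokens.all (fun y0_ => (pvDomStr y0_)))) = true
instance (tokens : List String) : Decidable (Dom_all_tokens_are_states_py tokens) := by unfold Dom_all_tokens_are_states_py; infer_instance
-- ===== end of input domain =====

-- B replaces A's greedy two-word-first consumer with a one-pass word-break
-- reachability DP carried in O(1) state (alternative decomposition, same cost).

-- ===== PORT A =====
-- the module-level set _US_STATES (shared by both Pythons)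
def usStates : PySem.Set String :=
  PySem.Set.ofList ["alabama", "alaska", "arizona", "arkansas", "california", "colorado", "connecticut", "delaware", "florida", "georgia", "hawaii", "idaho", "illinois", "indiana", "iowa", "kansas", "kentucky", "louisiana", "maine", "maryland", "massachusetts", "michigan", "minnesota", "mississippi", "missouri", "montana", "nebraska", "nevada", "new hampshire", "new jersey", "new mexico", "new york", "north carolina", "north dakota", "ohio", "oklahoma", "oregon", "pennsylvania", "rhode island", "south carolina", "south dakota", "tennessee", "texas", "utah", "vermont", "virginia", "washington", "west virginia", "wisconsin", "wyoming"]

-- A's while loop: index i becomes the remaining suffix, found_any is threaded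
def loopA : List String → Bool → Bool
  | [], found => found
  | [t], _ =>
      if PySem.Set.contains usStates (PySem.Str.lower t) then loopA [] true else false
  | t :: u :: rest, _ =>
      if PySem.Set.contains usStates (PySem.Str.lower (t ++ " " ++ u)) then loopA rest true
      else if PySem.Set.contains usStates (PySem.Str.lower t) then loopA (u :: rest) true
      else false

def all_tokens_are_states_py (tokens : List String) : Bool :=
  loopA tokens false

-- ===== PORT B =====
-- B's loop body: state (r2, r1, prev) = (reachable[i-2], reachable[i-1], previous token)
def stepB (s : Bool × Bool × Option String) (tok : String) : Bool × Bool × Option String :=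
  let cur := (s.2.1 && PySem.Set.contains usStates (PySem.Str.lower tok))
      || (match s.2.2 with
          | some prev => s.1 && PySem.Set.contains usStates (PySem.Str.lower (prev ++ " " ++ tok))
          | none => false)
  (s.2.1, cur, some tok)

def all_tokens_are_states_py_alt (tokens : List String) : Bool :=
  !tokens.isEmpty && (tokens.foldl stepB ((false, true, none) : Bool × Bool × Option String)).2.1

-- ===== PRECONDITION & SPEC =====
def Spec_all_tokens_are_states_py (tokens : List String) (out : Bool) : Prop := out = all_tokens_are_states_py_alt tokens
instance (tokens : List String) (out : Bool) : Decidable (Spec_all_tokens_are_states_py tokens out) := by unfold Spec_all_tokens_are_states_py; infer_instance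

-- ===== CLAIM (what is proved, stated in full; the proofs are below) =====
def Claim_equal_all_tokens_are_states_py : Prop := ∀ (tokens : List String), Dom_all_tokens_are_states_py tokens → Spec_all_tokens_are_states_py tokens (all_tokens_are_states_py tokens)

-- ===== LEMMAS AND PROOFS =====

-- "tokens segments fully into state names": reference word-break predicate
def dp : List String → Bool
  | [] => true
  | [t] => PySem.Set.contains usStates (PySem.Str.lower t)
  | t :: u :: rest =>
      (PySem.Set.contains usStates (PySem.Str.lower t) && dp (u :: rest))
      || (PySem.Set.contains usStates (PySem.Str.lower (t ++ " " ++ u)) && dp rest)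

-- "ts segments, except its first word may only pair with the pending token p"
def dp2 (p : String) (ts : List String) : Bool :=
  match ts with
  | [] => false
  | u :: us => PySem.Set.contains usStates (PySem.Str.lower (p ++ " " ++ u)) && dp us

lemma not_contains_of_toList (L : List String) (x : String)
    (h : L.all (fun s => !(s.toList == x.toList)) = true) : L.contains x = false := by
  induction L with
  | nil => rfl
  | cons s t ih =>
      simp only [List.all_cons, Bool.and_eq_true, Bool.not_eq_eq_eq_not, Bool.not_true,
        beq_eq_false_iff_ne, ne_eq] at h
      simp only [List.contains_cons, Bool.or_eq_false_iff]
      refine ⟨?_, ih (by simpa using h.2)⟩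
      simp only [beq_eq_false_iff_ne, ne_eq]
      intro he
      exact h.1 (by rw [he])

lemma takeWhile_append_space (l₁ l₂ : List Char) (h : ' ' ∉ l₁) :
    (l₁ ++ ' ' :: l₂).takeWhile (· != ' ') = l₁ := by
  induction l₁ with
  | nil => simp
  | cons c t ih =>
      simp only [List.mem_cons, not_or] at h
      simp [Ne.symm h.1, ih h.2]

-- st has exactly one space, hence the lowered first token is st's first word,
-- and (checked by decide over the whole set) that word is not itself a state
lemma finish_space (L : List String) (a b st : String)
    (hcl : List.map PySem.Chars.lowerChar a.toList ++ ' ' :: List.map PySem.Chars.lowerChar b.toList = st.toList)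
    (hok : L.all (fun s => !(s.toList == st.toList.takeWhile (· != ' '))) = true)
    (hcount : List.count ' ' st.toList = 1) :
    L.contains (PySem.Str.lower a) = false := by
  have hc := congrArg (List.count ' ') hcl
  rw [List.count_append, List.count_cons, hcount] at hc
  have h0 : List.count ' ' (List.map PySem.Chars.lowerChar a.toList) = 0 := by
    simp at hc; omega
  have hnsp := List.count_eq_zero.mp h0
  have htw := congrArg (List.takeWhile (· != ' ')) hcl
  rw [takeWhile_append_space _ _ hnsp] at htw
  apply not_contains_of_toList
  have hfin : (PySem.Str.lower a).toList = st.toList.takeWhile (· != ' ') := by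
    rw [PySem.Str.toList_lower, PySem.Chars.lower, htw]
  simp only [hfin]
  exact hok

-- st has no space at all: contradicts the space the concatenation contains
lemma finish_nospace (a b st : String)
    (hcl : List.map PySem.Chars.lowerChar a.toList ++ ' ' :: List.map PySem.Chars.lowerChar b.toList = st.toList)
    (hcount : List.count ' ' st.toList = 0) : False := by
  have hsp : ' ' ∈ st.toList := by
    rw [← hcl]; exact List.mem_append_right _ (List.mem_cons_self)
  exact (List.count_eq_zero.mp hcount) hsp

set_option maxRecDepth 16384 in
set_option maxHeartbeats 2000000 in
-- the crucial fact behind greedy = DP: no one-word state begins a two-word state,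
-- so whenever "t u" (lowered) is a state, t alone (lowered) is not
lemma key (a b : String)
    (h : PySem.Set.contains usStates (PySem.Str.lower (a ++ " " ++ b)) = true) :
    PySem.Set.contains usStates (PySem.Str.lower a) = false := by
  have hm : PySem.Str.lower (a ++ " " ++ b) ∈ (usStates : List String) :=
    List.mem_of_elem_eq_true h
  have hus : (usStates : List String) = ["alabama", "alaska", "arizona", "arkansas", "california", "colorado", "connecticut", "delaware", "florida", "georgia", "hawaii", "idaho", "illinois", "indiana", "iowa", "kansas", "kentucky", "louisiana", "maine", "maryland", "massachusetts", "michigan", "minnesota", "mississippi", "missouri", "montana", "nebraska", "nevada", "new hampshire", "new jersey", "new mexico", "new york", "north carolina", "north dakota", "ohio", "oklahoma", "oregon", "pennsylvania", "rhode island", "south carolina", "south dakota", "tennessee", "texas", "utah", "vermont", "virginia", "washington", "west virginia", "wisconsin", "wyoming"] := by decide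
  rw [hus] at hm
  show List.contains _ _ = false
  rw [hus]
  simp only [List.mem_cons, List.not_mem_nil, or_false] at hm
  rcases hm with h|h|h|h|h|h|h|h|h|h|h|h|h|h|h|h|h|h|h|h|h|h|h|h|h|h|h|h|h|h|h|h|h|h|h|h|h|h|h|h|h|h|h|h|h|h|h|h|h|h <;>
  · have hx := congrArg String.toList h
    simp only [String.toList_append, PySem.Str.toList_lower, PySem.Chars.lower,
      List.map_append, (by decide : (" " : String).toList = [' ']), List.map_cons,
      (by decide : PySem.Chars.lowerChar ' ' = ' '),
      List.append_assoc, List.singleton_append] at hx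
    first
    | exact finish_space _ a b _ hx (by decide) (by decide)
    | exact (finish_nospace a b _ hx (by decide)).elim

-- found_any does not influence the loop once tokens remain
lemma loopA_found (ts : List String) (hne : ts ≠ []) (f g : Bool) :
    loopA ts f = loopA ts g := by
  match ts with
  | [t] => rfl
  | t :: u :: rest => rfl

-- greedy = word-break segmentability, thanks to `key`
lemma loopA_eq_dp (ts : List String) : loopA ts true = dp ts := by
  match ts with
  | [] => rfl
  | [t] => simp [loopA, dp]
  | t :: u :: rest =>
    rw [loopA, dp]
    by_cases h2 : PySem.Set.contains usStates (PySem.Str.lower (t ++ " " ++ u)) = true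
    · rw [if_pos h2, h2, key t u h2, loopA_eq_dp rest]
      simp
    · rw [if_neg h2, Bool.eq_false_iff.mpr h2]
      by_cases h1 : PySem.Set.contains usStates (PySem.Str.lower t) = true
      · rw [if_pos h1, h1, loopA_eq_dp (u :: rest)]
        simp
      · rw [if_neg h1, Bool.eq_false_iff.mpr h1]
        simp

lemma dp_cons (t : String) (ts : List String) :
    dp (t :: ts) = ((PySem.Set.contains usStates (PySem.Str.lower t) && dp ts) || dp2 t ts) := by
  match ts with
  | [] => simp [dp, dp2]
  | u :: us => rfl

-- the fold's middle component, with a pending previous token p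
lemma fold_some (ts : List String) (r2 r1 : Bool) (p : String) :
    (ts.foldl stepB ((r2, r1, some p) : Bool × Bool × Option String)).2.1
      = ((r1 && dp ts) || (r2 && dp2 p ts)) := by
  induction ts generalizing r2 r1 p with
  | nil => simp [dp, dp2]
  | cons t ts ih =>
      rw [List.foldl_cons]
      show (ts.foldl stepB ((r1, ((r1 && PySem.Set.contains usStates (PySem.Str.lower t))
        || (r2 && PySem.Set.contains usStates (PySem.Str.lower (p ++ " " ++ t)))), some t)
        : Bool × Bool × Option String)).2.1 = _
      rw [ih, dp_cons]
      cases ts with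
      | nil => simp [dp, dp2]
      | cons u us =>
          simp only [dp2]
          generalize PySem.Set.contains usStates (PySem.Str.lower t) = c1
          generalize PySem.Set.contains usStates (PySem.Str.lower (p ++ " " ++ t)) = c2
          generalize PySem.Set.contains usStates (PySem.Str.lower (t ++ " " ++ u)) = c3
          generalize dp (u :: us) = d1
          generalize dp us = d2
          revert r1 r2 c1 c2 c3 d1 d2
          decide

lemma fold_none (ts : List String) (r2 r1 : Bool) :
    (ts.foldl stepB ((r2, r1, none) : Bool × Bool × Option String)).2.1 = (r1 && dp ts) := by
  match ts with
  | [] => simp [dp]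
  | t :: ts =>
      rw [List.foldl_cons]
      show (ts.foldl stepB ((r1, _, some t) : Bool × Bool × Option String)).2.1 = _
      rw [fold_some, dp_cons]
      cases r1 <;> cases PySem.Set.contains usStates (PySem.Str.lower t) <;> simp

-- ===== VERDICT (by name: the statement is the Claim_ definition above) =====
theorem all_tokens_are_states_py_spec : Claim_equal_all_tokens_are_states_py := by
  intro tokens _
  show all_tokens_are_states_py tokens = all_tokens_are_states_py_alt tokens
  match tokens with
  | [] => rfl
  | t :: ts =>
      rw [all_tokens_are_states_py, all_tokens_are_states_py_alt,
        loopA_found (t :: ts) (by simp) false true, loopA_eq_dp, fold_none]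
      simp [dp_cons]
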